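-- pv_equiv track=rewrite | github.com/SS-hj/coding_test | programmers/132266.py | solution
-- ===== SOURCE A (Python) =====
-- from collections import deque
--
-- def solution(n, roads, sources, destination):
--     adj = [[] for _ in range(n+1)]
--     for u, v in roads:
--         adj[u].append(v)
--         adj[v].append(u)
--     dist = [-1]*(n+1)
--     dist[destination] = 0
--     q = deque([destination])
--     while q:
--         x = q.popleft()
--         for nx in adj[x]:
--             if dist[nx]==-1:
--                 dist[nx] = dist[x]+1
--                 q.append(nx)
--     return [dist[i] for i in sources]
-- ===== SOURCE B (Python) =====
-- def solution(n, roads, sources, destination):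
--     dist = [-1] * (n + 1)
--     dist[destination] = 0
--     for level in range(n):
--         changed = False
--         for u, v in roads:
--             if dist[u] == level and dist[v] == -1:
--                 dist[v] = level + 1
--                 changed = True
--             if dist[v] == level and dist[u] == -1:
--                 dist[u] = level + 1
--                 changed = True
--         if not changed:
--             break
--     return [dist[i] for i in sources]
-- ===== Notes on version B (the rewrite author's own statement) =====
-- stated objective: alternative
-- what changed: Replaces A's adjacency-list + FIFO-queue BFS by Bellman-Ford-style rounds: the raw edge list is rescanned once per distance level, relaxing both directions of every edge, with an early break when a round changes nothing; no adjacency list and no queue are built.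
import Mathlib
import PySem

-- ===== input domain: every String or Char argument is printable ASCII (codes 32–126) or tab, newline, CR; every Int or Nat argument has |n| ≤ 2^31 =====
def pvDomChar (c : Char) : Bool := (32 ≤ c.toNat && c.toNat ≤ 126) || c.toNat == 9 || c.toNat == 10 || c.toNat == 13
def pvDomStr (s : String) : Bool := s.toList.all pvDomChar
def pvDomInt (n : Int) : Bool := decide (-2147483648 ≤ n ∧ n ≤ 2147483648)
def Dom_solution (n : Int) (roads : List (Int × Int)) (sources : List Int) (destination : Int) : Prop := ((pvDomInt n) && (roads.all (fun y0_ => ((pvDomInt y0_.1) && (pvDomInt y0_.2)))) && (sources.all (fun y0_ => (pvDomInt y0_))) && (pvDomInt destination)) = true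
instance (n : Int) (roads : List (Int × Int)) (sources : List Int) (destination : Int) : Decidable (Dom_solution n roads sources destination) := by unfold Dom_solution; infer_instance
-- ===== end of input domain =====

-- B replaces A's adjacency-list + queue BFS by Bellman–Ford-style rounds of edge
-- relaxation (scan the raw edge list once per level, no adjacency list and no queue);
-- same return value on Pre_.

-- ===== PORT A =====
-- adj[i].append(v)
def pyAppendAt (adj : List (List Int)) (i : Int) (v : Int) : List (List Int) :=
  PySem.List.pySetD adj i (PySem.List.pyGetD adj i ([] : List Int) ++ [v])

-- adj = [[] for _ in range(n+1)]; for u, v in roads: adj[u].append(v); adj[v].append(u)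
def buildAdj (n : Int) (roads : List (Int × Int)) : List (List Int) :=
  roads.foldl (fun adj uv => pyAppendAt (pyAppendAt adj uv.1 uv.2) uv.2 uv.1)
    ((List.range (n + 1).toNat).map (fun _ => ([] : List Int)))

-- body of A's inner 'for nx in adj[x]' loop; state = (dist, q).
-- pyGetD's defaults are only reached on indices where Python raises (excluded by Pre_).
def stepA (x : Int) (s : List Int × List Int) (nx : Int) : List Int × List Int :=
  if PySem.List.pyGetD s.1 nx 0 = -1 then
    (PySem.List.pySetD s.1 nx (PySem.List.pyGetD s.1 x 0 + 1), s.2 ++ [nx])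
  else s

-- A's 'while q' loop; fuel only makes the recursion structural (it is provably ample).
def loopA (adj : List (List Int)) : Nat → List Int → List Int → List Int
  | 0, dist, _ => dist
  | _ + 1, dist, [] => dist
  | fuel + 1, dist, x :: rest =>
      let s := (PySem.List.pyGetD adj x ([] : List Int)).foldl (stepA x) (dist, rest)
      loopA adj fuel s.1 s.2

def solution (n : Int) (roads : List (Int × Int)) (sources : List Int) (destination : Int) : List Int :=
  let adj := buildAdj n roads
  let dist0 := PySem.List.pySetD (List.replicate (n + 1).toNat (-1 : Int)) destination 0
  let dist := loopA adj (2 * (n + 1).toNat + 2) dist0 [destination]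
  sources.map (fun i => PySem.List.pyGetD dist i 0)

-- ===== PORT B =====
-- body of B's 'for u, v in roads' loop: the two relaxation ifs; state = (dist, changed)
def relax (level : Int) (s : List Int × Bool) (uv : Int × Int) : List Int × Bool :=
  let s1 := if PySem.List.pyGetD s.1 uv.1 0 = level ∧ PySem.List.pyGetD s.1 uv.2 0 = -1
    then (PySem.List.pySetD s.1 uv.2 (level + 1), true) else s
  if PySem.List.pyGetD s1.1 uv.2 0 = level ∧ PySem.List.pyGetD s1.1 uv.1 0 = -1
    then (PySem.List.pySetD s1.1 uv.1 (level + 1), true) else s1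

-- B's 'for level in range(n)' loop with the 'if not changed: break'
def loopsB (roads : List (Int × Int)) : List Int → List Int → List Int
  | [], dist => dist
  | level :: rest, dist =>
      let s := roads.foldl (relax level) (dist, false)
      if s.2 then loopsB roads rest s.1 else s.1

def solution_alt (n : Int) (roads : List (Int × Int)) (sources : List Int) (destination : Int) : List Int :=
  let dist0 := PySem.List.pySetD (List.replicate (n + 1).toNat (-1 : Int)) destination 0
  let dist := loopsB roads (PySem.List.pyRange 0 n 1) dist0
  sources.map (fun i => PySem.List.pyGetD dist i 0)

-- ===== PRECONDITION & SPEC =====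
-- Pre_ = exactly the inputs where Python A returns: every index used (road endpoints,
-- destination, sources) is a valid Python index into the length-(n+1) lists (else IndexError).
def Pre_solution (n : Int) (roads : List (Int × Int)) (sources : List Int) (destination : Int) : Prop :=
  PySem.Raise.InRange (n + 1).toNat destination ∧
  (∀ uv ∈ roads, PySem.Raise.InRange (n + 1).toNat uv.1 ∧ PySem.Raise.InRange (n + 1).toNat uv.2) ∧
  (∀ s ∈ sources, PySem.Raise.InRange (n + 1).toNat s)
instance (n : Int) (roads : List (Int × Int)) (sources : List Int) (destination : Int) : Decidable (Pre_solution n roads sources destination) := by unfold Pre_solution; infer_instance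

def pvWitness_solution : Int × (List (Int × Int)) × List Int × Int := (3, [(0, 1), (1, 2)], [0, 1, 3], 2)

def Spec_solution (n : Int) (roads : List (Int × Int)) (sources : List Int) (destination : Int) (out : List Int) : Prop := out = solution_alt n roads sources destination
instance (n : Int) (roads : List (Int × Int)) (sources : List Int) (destination : Int) (out : List Int) : Decidable (Spec_solution n roads sources destination out) := by unfold Spec_solution; infer_instance

-- ===== CLAIM (what is proved, stated in full; the proofs are below) =====
def Claim_equal_solution : Prop := ∀ (n : Int) (roads : List (Int × Int)) (sources : List Int) (destination : Int), Dom_solution n roads sources destination → Pre_solution n roads sources destination → Spec_solution n roads sources destination (solution n roads sources destination)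

-- ===== LEMMAS AND PROOFS =====

-- total Nat-indexed accessor used throughout the proofs
def at' (d : List Int) (k : Nat) : Int := d.getD k 0

def countNeg (d : List Int) : Nat := d.countP (fun v => decide (v = -1))

-- proof-only intermediate machine: the level-synchronous form of A's BFS
def stepB (level : Int) (s : List Int × List Int) (y : Int) : List Int × List Int :=
  if PySem.List.pyGetD s.1 y 0 = -1 then
    (PySem.List.pySetD s.1 y (level + 1), s.2 ++ [y])
  else s

def visitB (adj : List (List Int)) (level : Int) (s : List Int × List Int) (x : Int) :
    List Int × List Int :=
  (PySem.List.pyGetD adj x ([] : List Int)).foldl (stepB level) s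

def loopB (adj : List (List Int)) : Nat → Int → List Int → List Int → List Int
  | 0, _, dist, _ => dist
  | _ + 1, _, dist, [] => dist
  | fuel + 1, level, dist, x :: rest =>
      let s := (x :: rest).foldl (visitB adj level) (dist, ([] : List Int))
      loopB adj fuel (level + 1) s.1 s.2

-- discovery conditions of one round, A-side (via adjacency) and B-side (via edges)
def PA (adj : List (List Int)) (N : Nat) (f : List Int) (k : Nat) : Prop :=
  ∃ x ∈ f, ∃ v ∈ PySem.List.pyGetD adj x ([] : List Int), PySem.List.pyIdx? N v = some k

def PB (roads : List (Int × Int)) (N : Nat) (d : List Int) (L : Int) (k : Nat) : Prop :=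
  ∃ uv ∈ roads, (PySem.List.pyGetD d uv.1 0 = L ∧ PySem.List.pyIdx? N uv.2 = some k) ∨
    (PySem.List.pyGetD d uv.2 0 = L ∧ PySem.List.pyIdx? N uv.1 = some k)

def intsFrom (L : Int) (m : Nat) : List Int := (List.range m).map (fun j => L + Int.ofNat j)

lemma idx_lt {n : Nat} {i : Int} {k : Nat} (h : PySem.List.pyIdx? n i = some k) : k < n := by
  unfold PySem.List.pyIdx? at h
  split_ifs at h <;> simp_all <;> omega

lemma getD_idx {α : Type} {d : List α} {i : Int} {k : Nat}
    (h : PySem.List.pyIdx? d.length i = some k) (c : α) :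
    PySem.List.pyGetD d i c = d[k]'(idx_lt h) := by
  unfold PySem.List.pyGetD PySem.List.pyGet?
  rw [h]
  simp [List.getElem?_eq_getElem (idx_lt h)]

lemma getD_noidx {α : Type} {d : List α} {i : Int} (h : PySem.List.pyIdx? d.length i = none)
    (c : α) : PySem.List.pyGetD d i c = c := by
  unfold PySem.List.pyGetD PySem.List.pyGet?
  rw [h]; rfl

lemma setD_idx {α : Type} {d : List α} {i : Int} {k : Nat}
    (h : PySem.List.pyIdx? d.length i = some k) (v : α) :
    PySem.List.pySetD d i v = d.set k v := by
  unfold PySem.List.pySetD PySem.List.pySet?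
  rw [h]; rfl

lemma at'_lt {d : List Int} {k : Nat} (hk : k < d.length) : at' d k = d[k] := by
  simp [at', List.getD, List.getElem?_eq_getElem hk]

lemma getD_idx' {d : List Int} {i : Int} {k : Nat}
    (h : PySem.List.pyIdx? d.length i = some k) (c : Int) :
    PySem.List.pyGetD d i c = at' d k := by
  rw [getD_idx h c, at'_lt (idx_lt h)]

lemma at'_set {d : List Int} {k : Nat} (hk : k < d.length) (v : Int) (k' : Nat) :
    at' (d.set k v) k' = if k' = k then v else at' d k' := by
  simp only [at', List.getD, List.getElem?_set]
  by_cases h : k = k'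
  · subst h; simp [hk]
  · simp [h, Ne.symm h]

lemma ext_at' {d e : List Int} (hl : d.length = e.length)
    (h : ∀ k, k < d.length → at' d k = at' e k) : d = e := by
  apply List.ext_getElem hl
  intro k h1 h2
  rw [← at'_lt h1, ← at'_lt h2]
  exact h k h1

lemma countNeg_set_flip {d : List Int} {k : Nat} (hk : k < d.length) (hv : d[k] = -1)
    {w : Int} (hw : w ≠ -1) : countNeg (d.set k w) + 1 = countNeg d := by
  unfold countNeg
  rw [List.countP_set hk]
  have hpos : 0 < d.countP (fun v => decide (v = -1)) :=
    List.countP_pos_iff.mpr ⟨d[k], List.getElem_mem hk, by simp [hv]⟩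
  simp [hv, hw]
  omega

lemma countNeg_zero {d : List Int} (h : countNeg d = 0) {k : Nat} (hk : k < d.length) :
    at' d k ≠ -1 := by
  rw [at'_lt hk]
  intro hc
  have := List.countP_eq_zero.mp h _ (List.getElem_mem hk)
  simp [hc] at this

lemma idx_of_inRange {n : Nat} {i : Int} (h : PySem.Raise.InRange n i) :
    ∃ k, PySem.List.pyIdx? n i = some k := by
  obtain ⟨h1, h2⟩ := h
  unfold PySem.List.pyIdx?
  split_ifs <;> exact ⟨_, rfl⟩

lemma getD_set (d : List Int) (k : Nat) (v : Int) (z c : Int) (hk : k < d.length) :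
    PySem.List.pyGetD (d.set k v) z c =
      if PySem.List.pyIdx? d.length z = some k then v else PySem.List.pyGetD d z c := by
  unfold PySem.List.pyGetD PySem.List.pyGet?
  rw [List.length_set]
  cases h : PySem.List.pyIdx? d.length z with
  | none => simp
  | some k' =>
      have hk' : k' < d.length := by
        unfold PySem.List.pyIdx? at h; split_ifs at h <;> simp_all <;> omega
      simp only [Option.bind_some]
      rw [List.getElem?_set]
      by_cases he : k = k'
      · subst he; simp [hk]
      · simp [he, Ne.symm he]

-- ===== step 1: As queue BFS equals the level-synchronous machine (loopB) =====

lemma inner_both (N : Nat) :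
    ∀ (l d : List Int) (L x : Int),
      d.length = N → PySem.List.pyGetD d x 0 = L → 0 ≤ L →
      ∃ D E : List Int,
        (∀ q, l.foldl (stepA x) (d, q) = (D, q ++ E)) ∧
        (∀ acc, l.foldl (stepB L) (d, acc) = (D, acc ++ E)) ∧
        D.length = N ∧
        countNeg D + E.length = countNeg d ∧
        (∀ y ∈ E, PySem.List.pyGetD D y 0 = L + 1) ∧
        (∀ z : Int, PySem.List.pyGetD d z 0 ≠ -1 →
          PySem.List.pyGetD D z 0 = PySem.List.pyGetD d z 0) := by
  intro l
  induction l with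
  | nil =>
      intro d L x hd hx hL
      exact ⟨d, [], by simp, by simp, hd, by simp, by simp, fun z _ => rfl⟩
  | cons y l' IH =>
      intro d L x hd hx hL
      by_cases hg : PySem.List.pyGetD d y 0 = -1
      · obtain ⟨k, hk⟩ : ∃ k, PySem.List.pyIdx? d.length y = some k := by
          cases h : PySem.List.pyIdx? d.length y with
          | none => rw [getD_noidx h 0] at hg; norm_num at hg
          | some k => exact ⟨k, rfl⟩
        have hklt : k < d.length := idx_lt hk
        have hdk : d[k] = -1 := by rw [getD_idx hk 0] at hg; exact hg
        have hstepA : ∀ q, stepA x (d, q) y = (d.set k (L + 1), q ++ [y]) := by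
          intro q
          unfold stepA
          simp only [hg, hx]
          rw [setD_idx hk]
          simp
        have hstepB : ∀ acc, stepB L (d, acc) y = (d.set k (L + 1), acc ++ [y]) := by
          intro acc
          unfold stepB
          simp only [hg]
          rw [setD_idx hk]
          simp
        have hd1len : (d.set k (L + 1)).length = N := by rw [List.length_set]; exact hd
        have hx1 : PySem.List.pyGetD (d.set k (L + 1)) x 0 = L := by
          rw [getD_set d k (L + 1) x 0 hklt]
          split_ifs with hix
          · rw [getD_idx hix 0, hdk] at hx; omega
          · exact hx
        obtain ⟨D, E, hA, hB, hlen, hcnt, hE, hpres⟩ := IH (d.set k (L + 1)) L x hd1len hx1 hL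
        have hflip : countNeg (d.set k (L + 1)) + 1 = countNeg d :=
          countNeg_set_flip hklt hdk (by omega)
        have hy1 : PySem.List.pyGetD (d.set k (L + 1)) y 0 = L + 1 := by
          rw [getD_set d k (L + 1) y 0 hklt, if_pos hk]
        refine ⟨D, y :: E, ?_, ?_, hlen, ?_, ?_, ?_⟩
        · intro q
          rw [List.foldl_cons, hstepA q, hA (q ++ [y])]
          simp
        · intro acc
          rw [List.foldl_cons, hstepB acc, hB (acc ++ [y])]
          simp
        · simp only [List.length_cons]
          omega
        · intro w hw
          rcases List.mem_cons.mp hw with rfl | hwE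
          · exact (hpres _ (by rw [hy1]; omega)).trans hy1
          · exact hE w hwE
        · intro z hz
          have hz1 : PySem.List.pyGetD (d.set k (L + 1)) z 0 = PySem.List.pyGetD d z 0 := by
            rw [getD_set d k (L + 1) z 0 hklt]
            split_ifs with hiz
            · rw [getD_idx hiz 0, hdk] at hz; exact absurd rfl hz
            · rfl
          rw [hpres z (by rw [hz1]; exact hz), hz1]
      · have hstepA : ∀ q, stepA x (d, q) y = (d, q) := by
          intro q; unfold stepA; simp [hg]
        have hstepB : ∀ acc, stepB L (d, acc) y = (d, acc) := by
          intro acc; unfold stepB; simp [hg]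
        obtain ⟨D, E, hA, hB, hlen, hcnt, hE, hpres⟩ := IH d L x hd hx hL
        exact ⟨D, E, fun q => by rw [List.foldl_cons, hstepA q]; exact hA q,
          fun acc => by rw [List.foldl_cons, hstepB acc]; exact hB acc, hlen, hcnt, hE, hpres⟩

lemma bfs_sim (adjl : List (List Int)) (N : Nat) :
    ∀ (μ : Nat) (d f g : List Int) (L : Int) (fa fb : Nat),
      2 * countNeg d + f.length + 2 * g.length ≤ μ →
      d.length = N → 0 ≤ L →
      (∀ x ∈ f, PySem.List.pyGetD d x 0 = L) →
      (∀ x ∈ g, PySem.List.pyGetD d x 0 = L + 1) →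
      2 * countNeg d + f.length + 2 * g.length + 1 ≤ fa →
      countNeg d + g.length + 1 ≤ fb →
      loopA adjl fa d (f ++ g) =
        loopB adjl fb (L + 1) (f.foldl (visitB adjl L) (d, g)).1
          (f.foldl (visitB adjl L) (d, g)).2 := by
  intro mu
  induction mu using Nat.strong_induction_on with
  | _ mu IH =>
    intro d f g L fa fb hmu hd hL hf hg hfa hfb
    cases f with
    | nil =>
        simp only [List.foldl_nil, List.nil_append]
        cases g with
        | nil => cases fa <;> cases fb <;> simp [loopA, loopB]
        | cons y g' =>
            cases fb with
            | zero => simp at hfb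
            | succ fb' =>
                have hgl : (y :: g').length = g'.length + 1 := rfl
                have hrec := IH (2 * countNeg d + (y :: g').length)
                  (by omega) d (y :: g') [] (L + 1) fa fb'
                  (by simp) hd (by omega) hg (by simp)
                  (by simp only [List.length_cons, List.length_nil] at *; omega) (by simp only [List.length_nil]; omega)
                simp only [List.append_nil] at hrec
                rw [hrec]
                simp [loopB]
    | cons x f' =>
        cases fa with
        | zero => simp at hfa
        | succ fa' =>
            obtain ⟨D, E, hA, hB, hlen, hcnt, hE, hpres⟩ :=
              inner_both N (PySem.List.pyGetD adjl x ([] : List Int)) d L x hd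
                (hf x List.mem_cons_self) hL
            have hAstep : loopA adjl (fa' + 1) d ((x :: f') ++ g) =
                loopA adjl fa' D ((f' ++ g) ++ E) := by
              simp only [List.cons_append, loopA]
              rw [hA (f' ++ g)]
            have hBstep : (x :: f').foldl (visitB adjl L) (d, g) =
                f'.foldl (visitB adjl L) (D, g ++ E) := by
              rw [List.foldl_cons]
              have : visitB adjl L (d, g) x = (D, g ++ E) := by unfold visitB; exact hB g
              rw [this]
            have hcl : (x :: f').length = f'.length + 1 := rfl
            have hal : (g ++ E).length = g.length + E.length := List.length_append
            have hrec := IH (2 * countNeg D + f'.length + 2 * (g ++ E).length)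
              (by omega) D f' (g ++ E) L fa' fb (le_refl _) hlen hL
              (fun x' hx' => by
                rw [hpres x' (by rw [hf x' (List.mem_cons_of_mem _ hx')]; omega)]
                exact hf x' (List.mem_cons_of_mem _ hx'))
              (fun x' hx' => by
                rcases List.mem_append.mp hx' with hxg | hxE
                · rw [hpres x' (by rw [hg x' hxg]; omega)]
                  exact hg x' hxg
                · exact hE x' hxE)
              (by omega) (by omega)
            rw [hAstep, List.append_assoc, hrec, hBstep]

-- ===== step 2: round characterizations =====

lemma charInner {L : Int} (hL : 0 ≤ L) :
    ∀ (l d : List Int),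
      ∃ D E : List Int,
        (∀ acc, l.foldl (stepB L) (d, acc) = (D, acc ++ E)) ∧
        D.length = d.length ∧
        countNeg D + E.length = countNeg d ∧
        (∀ k, k < d.length →
          (at' d k = -1 ∧ (∃ v ∈ l, PySem.List.pyIdx? d.length v = some k) → at' D k = L + 1) ∧
          (¬(at' d k = -1 ∧ ∃ v ∈ l, PySem.List.pyIdx? d.length v = some k) → at' D k = at' d k)) ∧
        (∀ k, k < d.length →
          ((∃ v ∈ E, PySem.List.pyIdx? d.length v = some k) ↔
            (at' d k = -1 ∧ ∃ v ∈ l, PySem.List.pyIdx? d.length v = some k))) ∧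
        (∀ v ∈ E, ∃ k, PySem.List.pyIdx? d.length v = some k) := by
  intro l
  induction l with
  | nil =>
      intro d
      refine ⟨d, [], by simp, rfl, by simp, ?_, ?_, by simp⟩
      · intro k hk
        exact ⟨fun h => by simp at h, fun _ => rfl⟩
      · intro k hk
        simp
  | cons y l' IH =>
      intro d
      by_cases hg : PySem.List.pyGetD d y 0 = -1
      · obtain ⟨k0, hk0⟩ : ∃ k0, PySem.List.pyIdx? d.length y = some k0 := by
          cases h : PySem.List.pyIdx? d.length y with
          | none => rw [getD_noidx h 0] at hg; norm_num at hg
          | some k0 => exact ⟨k0, rfl⟩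
        have hk0lt : k0 < d.length := idx_lt hk0
        have hdk0 : at' d k0 = -1 := by rw [← getD_idx' hk0 0]; exact hg
        have hstep : ∀ acc, stepB L (d, acc) y = (d.set k0 (L + 1), acc ++ [y]) := by
          intro acc; unfold stepB; simp only [hg]; rw [setD_idx hk0]; simp
        have hsl : (d.set k0 (L + 1)).length = d.length := List.length_set
        have hset : ∀ k, at' (d.set k0 (L + 1)) k = if k = k0 then L + 1 else at' d k :=
          fun k => at'_set hk0lt (L + 1) k
        obtain ⟨D, E', hfold, hlen, hcnt, hpt, hEch, hEc⟩ := IH (d.set k0 (L + 1))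
        rw [hsl] at hlen hpt hEch hEc
        have hflip : countNeg (d.set k0 (L + 1)) + 1 = countNeg d := by
          refine countNeg_set_flip hk0lt ?_ (by omega)
          rw [← at'_lt hk0lt]; exact hdk0
        refine ⟨D, y :: E', ?_, hlen, ?_, ?_, ?_, ?_⟩
        · intro acc
          rw [List.foldl_cons, hstep acc, hfold (acc ++ [y])]
          simp
        · simp only [List.length_cons]; omega
        · intro k hk
          constructor
          · rintro ⟨hneg, v, hv, hvk⟩
            by_cases hkk : k = k0
            · subst hkk
              rw [(hpt k hk).2 (by rw [hset k]; simp; omega)]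
              rw [hset k]; simp
            · rcases List.mem_cons.mp hv with rfl | hv'
              · rw [hk0] at hvk; simp at hvk; omega
              · refine (hpt k hk).1 ⟨?_, v, hv', hvk⟩
                rw [hset k, if_neg hkk]; exact hneg
          · intro hnc
            by_cases hkk : k = k0
            · exact absurd ⟨by rw [hkk]; exact hdk0, y, List.mem_cons_self, by rw [hkk]; exact hk0⟩ hnc
            · have h1 : at' (d.set k0 (L + 1)) k = at' d k := by rw [hset k, if_neg hkk]
              have : at' D k = at' (d.set k0 (L + 1)) k := by
                refine (hpt k hk).2 ?_
                rintro ⟨hneg, v, hv, hvk⟩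
                exact hnc ⟨by rw [← h1]; exact hneg, v, List.mem_cons_of_mem _ hv, hvk⟩
              rw [this, h1]
        · intro k hk
          by_cases hkk : k = k0
          · subst hkk
            constructor
            · intro _; exact ⟨hdk0, y, List.mem_cons_self, hk0⟩
            · intro _; exact ⟨y, List.mem_cons_self, hk0⟩
          · have h1 : at' (d.set k0 (L + 1)) k = at' d k := by rw [hset k, if_neg hkk]
            have hEch' := hEch k hk
            rw [h1] at hEch'
            constructor
            · rintro ⟨v, hv, hvk⟩
              rcases List.mem_cons.mp hv with rfl | hv'
              · rw [hk0] at hvk; simp at hvk; omega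
              · obtain ⟨hneg, v', hv'', hvk'⟩ := hEch'.mp ⟨v, hv', hvk⟩
                exact ⟨hneg, v', List.mem_cons_of_mem _ hv'', hvk'⟩
            · rintro ⟨hneg, v, hv, hvk⟩
              rcases List.mem_cons.mp hv with rfl | hv'
              · rw [hk0] at hvk; simp at hvk; omega
              · obtain ⟨v', hv'', hvk'⟩ := hEch'.mpr ⟨hneg, v, hv', hvk⟩
                exact ⟨v', List.mem_cons_of_mem _ hv'', hvk'⟩
        · intro v hv
          rcases List.mem_cons.mp hv with rfl | hv'
          · exact ⟨k0, hk0⟩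
          · exact hEc v hv'
      · have hstep : ∀ acc, stepB L (d, acc) y = (d, acc) := by
          intro acc; unfold stepB; simp [hg]
        obtain ⟨D, E, hfold, hlen, hcnt, hpt, hEch, hEc⟩ := IH d
        have hnoy : ∀ k, k < d.length → at' d k = -1 →
            PySem.List.pyIdx? d.length y = some k → False := by
          intro k hk hneg hyk
          rw [getD_idx' hyk 0] at hg
          exact hg hneg
        refine ⟨D, E, ?_, hlen, hcnt, ?_, ?_, hEc⟩
        · intro acc; rw [List.foldl_cons, hstep acc]; exact hfold acc
        · intro k hk
          constructor
          · rintro ⟨hneg, v, hv, hvk⟩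
            rcases List.mem_cons.mp hv with rfl | hv'
            · exact absurd hvk (fun h => hnoy k hk hneg h)
            · exact (hpt k hk).1 ⟨hneg, v, hv', hvk⟩
          · intro hnc
            refine (hpt k hk).2 ?_
            rintro ⟨hneg, v, hv, hvk⟩
            exact hnc ⟨hneg, v, List.mem_cons_of_mem _ hv, hvk⟩
        · intro k hk
          rw [hEch k hk]
          constructor
          · rintro ⟨hneg, v, hv, hvk⟩
            exact ⟨hneg, v, List.mem_cons_of_mem _ hv, hvk⟩
          · rintro ⟨hneg, v, hv, hvk⟩
            rcases List.mem_cons.mp hv with rfl | hv'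
            · exact absurd hvk (fun h => hnoy k hk hneg h)
            · exact ⟨hneg, v, hv', hvk⟩

lemma charRound (adj : List (List Int)) {L : Int} (hL : 0 ≤ L) :
    ∀ (f d : List Int),
      ∃ D E : List Int,
        (∀ acc, f.foldl (visitB adj L) (d, acc) = (D, acc ++ E)) ∧
        D.length = d.length ∧
        countNeg D + E.length = countNeg d ∧
        (∀ k, k < d.length →
          (at' d k = -1 ∧ PA adj d.length f k → at' D k = L + 1) ∧
          (¬(at' d k = -1 ∧ PA adj d.length f k) → at' D k = at' d k)) ∧
        (∀ k, k < d.length →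
          ((∃ v ∈ E, PySem.List.pyIdx? d.length v = some k) ↔
            (at' d k = -1 ∧ PA adj d.length f k))) ∧
        (∀ v ∈ E, ∃ k, PySem.List.pyIdx? d.length v = some k) := by
  intro f
  induction f with
  | nil =>
      intro d
      refine ⟨d, [], by simp, rfl, by simp, ?_, ?_, by simp⟩
      · intro k hk
        refine ⟨?_, fun _ => rfl⟩
        rintro ⟨-, x, hx, -⟩
        simp at hx
      · intro k hk
        simp [PA]
  | cons x f' IH =>
      intro d
      obtain ⟨D1, E1, hf1, hl1, hc1, hp1, hE1, hC1⟩ := charInner hL (PySem.List.pyGetD adj x ([] : List Int)) d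
      obtain ⟨D, E2, hf2, hl2, hc2, hp2, hE2, hC2⟩ := IH D1
      rw [hl1] at hl2 hp2 hE2 hC2
      have hD1cases : ∀ k, k < d.length → at' D1 k = at' d k ∨
          (at' d k = -1 ∧ (∃ v ∈ PySem.List.pyGetD adj x ([] : List Int),
            PySem.List.pyIdx? d.length v = some k) ∧ at' D1 k = L + 1) := by
        intro k hk
        by_cases hc : at' d k = -1 ∧ ∃ v ∈ PySem.List.pyGetD adj x ([] : List Int),
            PySem.List.pyIdx? d.length v = some k
        · exact Or.inr ⟨hc.1, hc.2, (hp1 k hk).1 hc⟩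
        · exact Or.inl ((hp1 k hk).2 hc)
      have hPAsplit : ∀ k, PA adj d.length (x :: f') k ↔
          ((∃ v ∈ PySem.List.pyGetD adj x ([] : List Int),
            PySem.List.pyIdx? d.length v = some k) ∨ PA adj d.length f' k) := by
        intro k
        constructor
        · rintro ⟨x', hx', hv⟩
          rcases List.mem_cons.mp hx' with rfl | hx''
          · exact Or.inl hv
          · exact Or.inr ⟨x', hx'', hv⟩
        · rintro (hv | ⟨x', hx', hv⟩)
          · exact ⟨x, List.mem_cons_self, hv⟩
          · exact ⟨x', List.mem_cons_of_mem _ hx', hv⟩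
      refine ⟨D, E1 ++ E2, ?_, hl2, ?_, ?_, ?_, ?_⟩
      · intro acc
        rw [List.foldl_cons]
        have : visitB adj L (d, acc) x = (D1, acc ++ E1) := hf1 acc
        rw [this, hf2 (acc ++ E1)]
        simp
      · rw [List.length_append]; omega
      · intro k hk
        constructor
        · rintro ⟨hneg, hPA⟩
          rcases (hPAsplit k).mp hPA with hc | hPAf
          · have h1 : at' D1 k = L + 1 := (hp1 k hk).1 ⟨hneg, hc⟩
            rw [(hp2 k hk).2 (by rw [h1]; rintro ⟨h, -⟩; omega)]
            exact h1
          · rcases hD1cases k hk with heq | ⟨-, -, hset⟩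
            · exact (hp2 k hk).1 ⟨by rw [heq]; exact hneg, hPAf⟩
            · rw [(hp2 k hk).2 (by rw [hset]; rintro ⟨h, -⟩; omega)]
              exact hset
        · intro hnc
          have h1 : at' D1 k = at' d k := by
            refine (hp1 k hk).2 ?_
            rintro ⟨hneg, hc⟩
            exact hnc ⟨hneg, (hPAsplit k).mpr (Or.inl hc)⟩
          have h2 : at' D k = at' D1 k := by
            refine (hp2 k hk).2 ?_
            rintro ⟨hneg, hPAf⟩
            rw [h1] at hneg
            exact hnc ⟨hneg, (hPAsplit k).mpr (Or.inr hPAf)⟩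
          rw [h2, h1]
      · intro k hk
        rw [hPAsplit k]
        constructor
        · rintro ⟨v, hv, hvk⟩
          rcases List.mem_append.mp hv with hv1 | hv2
          · obtain ⟨hneg, hc⟩ := (hE1 k hk).mp ⟨v, hv1, hvk⟩
            exact ⟨hneg, Or.inl hc⟩
          · obtain ⟨hneg, hPAf⟩ := (hE2 k hk).mp ⟨v, hv2, hvk⟩
            rcases hD1cases k hk with heq | ⟨hdneg, -, hset⟩
            · exact ⟨by rw [← heq]; exact hneg, Or.inr hPAf⟩
            · exact ⟨hdneg, Or.inr hPAf⟩
        · rintro ⟨hneg, hc | hPAf⟩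
          · obtain ⟨v, hv, hvk⟩ := (hE1 k hk).mpr ⟨hneg, hc⟩
            exact ⟨v, List.mem_append.mpr (Or.inl hv), hvk⟩
          · by_cases hc1' : ∃ v ∈ PySem.List.pyGetD adj x ([] : List Int),
                PySem.List.pyIdx? d.length v = some k
            · obtain ⟨v, hv, hvk⟩ := (hE1 k hk).mpr ⟨hneg, hc1'⟩
              exact ⟨v, List.mem_append.mpr (Or.inl hv), hvk⟩
            · have h1 : at' D1 k = at' d k := (hp1 k hk).2 (fun h => hc1' h.2)
              obtain ⟨v, hv, hvk⟩ := (hE2 k hk).mpr ⟨by rw [h1]; exact hneg, hPAf⟩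
              exact ⟨v, List.mem_append.mpr (Or.inr hv), hvk⟩
      · intro v hv
        rcases List.mem_append.mp hv with hv1 | hv2
        · exact hC1 v hv1
        · exact hC2 v hv2

lemma charB {L : Int} (hL : 0 ≤ L) :
    ∀ (roads : List (Int × Int)) (d : List Int) (b : Bool),
      (∀ uv ∈ roads, (∃ k, PySem.List.pyIdx? d.length uv.1 = some k) ∧
        (∃ k, PySem.List.pyIdx? d.length uv.2 = some k)) →
      ∃ D : List Int, ∃ ch : Bool,
        roads.foldl (relax L) (d, b) = (D, ch) ∧
        D.length = d.length ∧
        (∀ k, k < d.length →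
          (at' d k = -1 ∧ PB roads d.length d L k → at' D k = L + 1) ∧
          (¬(at' d k = -1 ∧ PB roads d.length d L k) → at' D k = at' d k)) ∧
        (ch = true ↔ (b = true ∨ ∃ k, k < d.length ∧ at' d k = -1 ∧ PB roads d.length d L k)) := by
  intro roads
  induction roads with
  | nil =>
      intro d b _
      refine ⟨d, b, by simp, rfl, ?_, ?_⟩
      · intro k hk
        refine ⟨?_, fun _ => rfl⟩
        rintro ⟨-, uv, huv, -⟩
        simp at huv
      · constructor
        · intro h; exact Or.inl h
        · rintro (h | ⟨k, -, -, uv, huv, -⟩)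
          · exact h
          · simp at huv
  | cons uv rs IH =>
      intro d b hEnds
      obtain ⟨ku, hku⟩ := (hEnds uv List.mem_cons_self).1
      obtain ⟨kv, hkv⟩ := (hEnds uv List.mem_cons_self).2
      have hkult : ku < d.length := idx_lt hku
      have hkvlt : kv < d.length := idx_lt hkv
      have hgu : PySem.List.pyGetD d uv.1 0 = at' d ku := getD_idx' hku 0
      have hgv : PySem.List.pyGetD d uv.2 0 = at' d kv := getD_idx' hkv 0
      -- the per-edge condition
      have hcondE : ∀ k, ((PySem.List.pyGetD d uv.1 0 = L ∧ PySem.List.pyIdx? d.length uv.2 = some k) ∨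
          (PySem.List.pyGetD d uv.2 0 = L ∧ PySem.List.pyIdx? d.length uv.1 = some k)) ↔
          ((at' d ku = L ∧ k = kv) ∨ (at' d kv = L ∧ k = ku)) := by
        intro k
        rw [hgu, hgv, hku, hkv]
        constructor
        · rintro (⟨h1, h2⟩ | ⟨h1, h2⟩)
          · exact Or.inl ⟨h1, (Option.some.inj h2).symm⟩
          · exact Or.inr ⟨h1, (Option.some.inj h2).symm⟩
        · rintro (⟨h1, rfl⟩ | ⟨h1, rfl⟩)
          · exact Or.inl ⟨h1, rfl⟩
          · exact Or.inr ⟨h1, rfl⟩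
      -- one-step evaluation
      obtain ⟨D0, b0, h0fold, h0len, h0pt, h0b⟩ :
          ∃ D0 b0, relax L (d, b) uv = (D0, b0) ∧ D0.length = d.length ∧
          (∀ k, k < d.length →
            (at' d k = -1 ∧ ((at' d ku = L ∧ k = kv) ∨ (at' d kv = L ∧ k = ku)) → at' D0 k = L + 1) ∧
            (¬(at' d k = -1 ∧ ((at' d ku = L ∧ k = kv) ∨ (at' d kv = L ∧ k = ku))) → at' D0 k = at' d k)) ∧
          (b0 = true ↔ (b = true ∨ ∃ k, k < d.length ∧ at' d k = -1 ∧
            ((at' d ku = L ∧ k = kv) ∨ (at' d kv = L ∧ k = ku)))) := by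
        by_cases hc1 : at' d ku = L ∧ at' d kv = -1
        · have hsl : (d.set kv (L + 1)).length = d.length := List.length_set
          have hgv' : PySem.List.pyGetD (d.set kv (L + 1)) uv.2 0 = L + 1 := by
            have : PySem.List.pyIdx? (d.set kv (L + 1)).length uv.2 = some kv := by rw [hsl]; exact hkv
            rw [getD_idx' this 0, at'_set hkvlt, if_pos rfl]
          refine ⟨d.set kv (L + 1), true, ?_, hsl, ?_, ?_⟩
          · unfold relax
            rw [hgu, hgv, if_pos hc1]
            simp only [setD_idx hkv]
            rw [hgv']
            rw [if_neg (by rintro ⟨h, -⟩; omega)]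
          · intro k hk
            rw [at'_set hkvlt]
            constructor
            · rintro ⟨hneg, (⟨-, rfl⟩ | ⟨hL', rfl⟩)⟩
              · rw [if_pos rfl]
              · rw [hc1.2] at hL'; omega
            · intro hnc
              rw [if_neg ?_]
              intro hkk
              exact hnc ⟨by rw [hkk]; exact hc1.2, Or.inl ⟨hc1.1, hkk⟩⟩
          · simp only [true_iff]
            exact Or.inr ⟨kv, hkvlt, hc1.2, Or.inl ⟨hc1.1, rfl⟩⟩
        · by_cases hc2 : at' d kv = L ∧ at' d ku = -1
          · have hsl : (d.set ku (L + 1)).length = d.length := List.length_set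
            refine ⟨d.set ku (L + 1), true, ?_, hsl, ?_, ?_⟩
            · unfold relax
              rw [hgu, hgv, if_neg hc1]
              simp only [hgu, hgv, if_pos hc2, setD_idx hku]
            · intro k hk
              rw [at'_set hkult]
              constructor
              · rintro ⟨hneg, (⟨hL', rfl⟩ | ⟨-, rfl⟩)⟩
                · rw [hc2.2] at hL'; omega
                · rw [if_pos rfl]
              · intro hnc
                rw [if_neg ?_]
                intro hkk
                exact hnc ⟨by rw [hkk]; exact hc2.2, Or.inr ⟨hc2.1, hkk⟩⟩
            · simp only [true_iff]
              exact Or.inr ⟨ku, hkult, hc2.2, Or.inr ⟨hc2.1, rfl⟩⟩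
          · refine ⟨d, b, ?_, rfl, ?_, ?_⟩
            · unfold relax
              rw [hgu, hgv, if_neg hc1]
              simp only [hgu, hgv, if_neg hc2]
            · intro k hk
              refine ⟨?_, fun _ => rfl⟩
              rintro ⟨hneg, (⟨h1, rfl⟩ | ⟨h1, rfl⟩)⟩
              · exact absurd ⟨h1, hneg⟩ hc1
              · exact absurd ⟨h1, hneg⟩ hc2
            · constructor
              · intro h; exact Or.inl h
              · rintro (h | ⟨k, hk, hneg, (⟨h1, rfl⟩ | ⟨h1, rfl⟩)⟩)
                · exact h
                · exact absurd ⟨h1, hneg⟩ hc1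
                · exact absurd ⟨h1, hneg⟩ hc2
      -- D0 facts
      have hD0stab : ∀ k, k < d.length → (at' D0 k = L ↔ at' d k = L) := by
        intro k hk
        by_cases hc : at' d k = -1 ∧ ((at' d ku = L ∧ k = kv) ∨ (at' d kv = L ∧ k = ku))
        · rw [(h0pt k hk).1 hc]
          constructor
          · intro h; omega
          · intro h; rw [h] at hc; exact absurd hc.1 (by omega)
        · rw [(h0pt k hk).2 hc]
      have hD0neg : ∀ k, k < d.length → (at' D0 k = -1 ↔
          (at' d k = -1 ∧ ¬((at' d ku = L ∧ k = kv) ∨ (at' d kv = L ∧ k = ku)))) := by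
        intro k hk
        by_cases hc : at' d k = -1 ∧ ((at' d ku = L ∧ k = kv) ∨ (at' d kv = L ∧ k = ku))
        · rw [(h0pt k hk).1 hc]
          constructor
          · intro h; omega
          · rintro ⟨-, h⟩; exact absurd hc.2 h
        · rw [(h0pt k hk).2 hc]
          constructor
          · intro h
            refine ⟨h, fun hcE => hc ⟨h, hcE⟩⟩
          · rintro ⟨h, -⟩; exact h
      -- PB over rs is stable from d to D0
      have hPBstab : ∀ k, PB rs d.length D0 L k ↔ PB rs d.length d L k := by
        intro k
        unfold PB
        constructor
        all_goals
          rintro ⟨uv', huv', hcase⟩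
          obtain ⟨ku', hku'⟩ := (hEnds uv' (List.mem_cons_of_mem _ huv')).1
          obtain ⟨kv', hkv'⟩ := (hEnds uv' (List.mem_cons_of_mem _ huv')).2
          have e1 : PySem.List.pyGetD D0 uv'.1 0 = at' D0 ku' := by
            have : PySem.List.pyIdx? D0.length uv'.1 = some ku' := by rw [h0len]; exact hku'
            exact getD_idx' this 0
          have e2 : PySem.List.pyGetD D0 uv'.2 0 = at' D0 kv' := by
            have : PySem.List.pyIdx? D0.length uv'.2 = some kv' := by rw [h0len]; exact hkv'
            exact getD_idx' this 0
          have e3 : PySem.List.pyGetD d uv'.1 0 = at' d ku' := getD_idx' hku' 0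
          have e4 : PySem.List.pyGetD d uv'.2 0 = at' d kv' := getD_idx' hkv' 0
          refine ⟨uv', huv', ?_⟩
          rcases hcase with ⟨h1, h2⟩ | ⟨h1, h2⟩
        · exact Or.inl ⟨by rw [e3, ← (hD0stab ku' (idx_lt hku')).mp (by rw [← e1]; exact h1)], h2⟩
        · exact Or.inr ⟨by rw [e4, ← (hD0stab kv' (idx_lt hkv')).mp (by rw [← e2]; exact h1)], h2⟩
        · exact Or.inl ⟨by rw [e1, (hD0stab ku' (idx_lt hku')).mpr (by rw [← e3]; exact h1)], h2⟩
        · exact Or.inr ⟨by rw [e2, (hD0stab kv' (idx_lt hkv')).mpr (by rw [← e4]; exact h1)], h2⟩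
      -- PB split on cons
      have hPBsplit : ∀ k, PB (uv :: rs) d.length d L k ↔
          (((at' d ku = L ∧ k = kv) ∨ (at' d kv = L ∧ k = ku)) ∨ PB rs d.length d L k) := by
        intro k
        unfold PB
        constructor
        · rintro ⟨uv', huv', hcase⟩
          rcases List.mem_cons.mp huv' with rfl | huv''
          · exact Or.inl ((hcondE k).mp hcase)
          · exact Or.inr ⟨uv', huv'', hcase⟩
        · rintro (hcE | ⟨uv', huv', hcase⟩)
          · exact ⟨uv, List.mem_cons_self, (hcondE k).mpr hcE⟩
          · exact ⟨uv', List.mem_cons_of_mem _ huv', hcase⟩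
      have hEnds' : ∀ uv' ∈ rs, (∃ k, PySem.List.pyIdx? D0.length uv'.1 = some k) ∧
          (∃ k, PySem.List.pyIdx? D0.length uv'.2 = some k) := by
        intro uv' huv'
        rw [h0len]
        exact hEnds uv' (List.mem_cons_of_mem _ huv')
      obtain ⟨D, ch, hfold, hlen, hpt, hch⟩ := IH D0 b0 hEnds'
      rw [h0len] at hlen hpt hch
      refine ⟨D, ch, ?_, hlen, ?_, ?_⟩
      · rw [List.foldl_cons, h0fold]; exact hfold
      · intro k hk
        constructor
        · rintro ⟨hneg, hPB⟩
          rcases (hPBsplit k).mp hPB with hcE | hPBr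
          · have h1 : at' D0 k = L + 1 := (h0pt k hk).1 ⟨hneg, hcE⟩
            rw [(hpt k hk).2 (by rw [h1]; rintro ⟨h, -⟩; omega)]
            exact h1
          · by_cases hcE : (at' d ku = L ∧ k = kv) ∨ (at' d kv = L ∧ k = ku)
            · have h1 : at' D0 k = L + 1 := (h0pt k hk).1 ⟨hneg, hcE⟩
              rw [(hpt k hk).2 (by rw [h1]; rintro ⟨h, -⟩; omega)]
              exact h1
            · have h1 : at' D0 k = at' d k := (h0pt k hk).2 (fun h => hcE h.2)
              rw [(hpt k hk).1 ⟨by rw [h1]; exact hneg, (hPBstab k).mpr hPBr⟩]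
        · intro hnc
          have h1 : at' D0 k = at' d k := by
            refine (h0pt k hk).2 ?_
            rintro ⟨hneg, hcE⟩
            exact hnc ⟨hneg, (hPBsplit k).mpr (Or.inl hcE)⟩
          have h2 : at' D k = at' D0 k := by
            refine (hpt k hk).2 ?_
            rintro ⟨hneg, hPBr⟩
            rw [h1] at hneg
            exact hnc ⟨hneg, (hPBsplit k).mpr (Or.inr ((hPBstab k).mp hPBr))⟩
          rw [h2, h1]
      · rw [hch, h0b]
        constructor
        · rintro ((h | ⟨k, hk, hneg, hcE⟩) | ⟨k, hk, hneg, hPBr⟩)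
          · exact Or.inl h
          · exact Or.inr ⟨k, hk, hneg, (hPBsplit k).mpr (Or.inl hcE)⟩
          · obtain ⟨hdneg, hncE⟩ := (hD0neg k hk).mp hneg
            exact Or.inr ⟨k, hk, hdneg, (hPBsplit k).mpr (Or.inr ((hPBstab k).mp hPBr))⟩
        · rintro (h | ⟨k, hk, hneg, hPB⟩)
          · exact Or.inl (Or.inl h)
          · rcases (hPBsplit k).mp hPB with hcE | hPBr
            · exact Or.inl (Or.inr ⟨k, hk, hneg, hcE⟩)
            · by_cases hcE : (at' d ku = L ∧ k = kv) ∨ (at' d kv = L ∧ k = ku)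
              · exact Or.inl (Or.inr ⟨k, hk, hneg, hcE⟩)
              · refine Or.inr ⟨k, hk, (hD0neg k hk).mpr ⟨hneg, hcE⟩, (hPBstab k).mpr hPBr⟩

-- ===== step 3: the two round conditions agree, and the level machine equals loopsB =====

lemma setD_noidx {α : Type} {d : List α} {i : Int} (h : PySem.List.pyIdx? d.length i = none)
    (v : α) : PySem.List.pySetD d i v = d := by
  unfold PySem.List.pySetD PySem.List.pySet?
  rw [h]; rfl

lemma getD_eq_getD {α : Type} {d : List α} {i : Int} {k : Nat}
    (h : PySem.List.pyIdx? d.length i = some k) (c : α) :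
    PySem.List.pyGetD d i c = d.getD k c := by
  rw [getD_idx h c]
  simp [List.getD, List.getElem?_eq_getElem (idx_lt h)]

lemma atL_set {α : Type} {d : List α} {k : Nat} (hk : k < d.length) (v : α) (c : α) (k' : Nat) :
    (d.set k v).getD k' c = if k' = k then v else d.getD k' c := by
  simp only [List.getD, List.getElem?_set]
  by_cases h : k = k'
  · subst h; simp [hk]
  · simp [h, Ne.symm h]

lemma appendAt_len (adj : List (List Int)) (i v : Int) :
    (pyAppendAt adj i v).length = adj.length := by
  unfold pyAppendAt
  cases h : PySem.List.pyIdx? adj.length i with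
  | none => rw [setD_noidx h]
  | some j => rw [setD_idx h]; exact List.length_set

lemma appendAt_char (adj : List (List Int)) (i v : Int) (k : Nat) :
    (pyAppendAt adj i v).getD k [] =
      if PySem.List.pyIdx? adj.length i = some k then adj.getD k [] ++ [v]
      else adj.getD k [] := by
  unfold pyAppendAt
  cases h : PySem.List.pyIdx? adj.length i with
  | none => rw [setD_noidx h]; simp
  | some j =>
      rw [setD_idx h, getD_eq_getD h, atL_set (idx_lt h)]
      by_cases hkj : k = j
      · subst hkj; simp
      · rw [if_neg hkj, if_neg (by simp; exact fun hh => hkj hh.symm)]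

lemma buildAdj_aux (N : Nat) :
    ∀ (rs : List (Int × Int)) (adj0 : List (List Int)), adj0.length = N →
      (rs.foldl (fun adj uv => pyAppendAt (pyAppendAt adj uv.1 uv.2) uv.2 uv.1) adj0).length = N ∧
      (∀ k, k < N → ∀ z : Int,
        (z ∈ (rs.foldl (fun adj uv => pyAppendAt (pyAppendAt adj uv.1 uv.2) uv.2 uv.1) adj0).getD k [] ↔
          z ∈ adj0.getD k [] ∨
          ∃ uv ∈ rs, (PySem.List.pyIdx? N uv.1 = some k ∧ uv.2 = z) ∨
            (PySem.List.pyIdx? N uv.2 = some k ∧ uv.1 = z))) := by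
  intro rs
  induction rs with
  | nil =>
      intro adj0 h0
      refine ⟨h0, ?_⟩
      intro k hk z
      simp
  | cons uv rs' IH =>
      intro adj0 h0
      have hl1 : (pyAppendAt adj0 uv.1 uv.2).length = N := by rw [appendAt_len]; exact h0
      have hl2 : (pyAppendAt (pyAppendAt adj0 uv.1 uv.2) uv.2 uv.1).length = N := by
        rw [appendAt_len]; exact hl1
      obtain ⟨hlen, hmem⟩ := IH (pyAppendAt (pyAppendAt adj0 uv.1 uv.2) uv.2 uv.1) hl2
      refine ⟨hlen, ?_⟩
      intro k hk z
      rw [List.foldl_cons, hmem k hk z]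
      have hstep : z ∈ (pyAppendAt (pyAppendAt adj0 uv.1 uv.2) uv.2 uv.1).getD k [] ↔
          (z ∈ adj0.getD k [] ∨
            (PySem.List.pyIdx? N uv.1 = some k ∧ uv.2 = z) ∨
            (PySem.List.pyIdx? N uv.2 = some k ∧ uv.1 = z)) := by
        rw [appendAt_char, hl1, appendAt_char, h0]
        by_cases h2 : PySem.List.pyIdx? N uv.2 = some k
        · rw [if_pos h2]
          by_cases h1 : PySem.List.pyIdx? N uv.1 = some k
          · rw [if_pos h1]
            simp only [List.mem_append, List.mem_singleton]
            constructor
            · rintro ((hz | rfl) | rfl)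
              · exact Or.inl hz
              · exact Or.inr (Or.inl ⟨h1, rfl⟩)
              · exact Or.inr (Or.inr ⟨h2, rfl⟩)
            · rintro (hz | ⟨-, rfl⟩ | ⟨-, rfl⟩)
              · exact Or.inl (Or.inl hz)
              · exact Or.inl (Or.inr rfl)
              · exact Or.inr rfl
          · rw [if_neg h1]
            simp only [List.mem_append, List.mem_singleton]
            constructor
            · rintro (hz | rfl)
              · exact Or.inl hz
              · exact Or.inr (Or.inr ⟨h2, rfl⟩)
            · rintro (hz | ⟨hc, rfl⟩ | ⟨-, rfl⟩)
              · exact Or.inl hz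
              · exact absurd hc h1
              · exact Or.inr rfl
        · rw [if_neg h2]
          by_cases h1 : PySem.List.pyIdx? N uv.1 = some k
          · rw [if_pos h1]
            simp only [List.mem_append, List.mem_singleton]
            constructor
            · rintro (hz | rfl)
              · exact Or.inl hz
              · exact Or.inr (Or.inl ⟨h1, rfl⟩)
            · rintro (hz | ⟨-, rfl⟩ | ⟨hc, rfl⟩)
              · exact Or.inl hz
              · exact Or.inr rfl
              · exact absurd hc h2
          · rw [if_neg h1]
            constructor
            · intro hz; exact Or.inl hz
            · rintro (hz | ⟨hc, rfl⟩ | ⟨hc, rfl⟩)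
              · exact hz
              · exact absurd hc h1
              · exact absurd hc h2
      rw [hstep]
      constructor
      · rintro ((hz | hc) | ⟨uv', huv', hc⟩)
        · exact Or.inl hz
        · exact Or.inr ⟨uv, List.mem_cons_self, hc⟩
        · exact Or.inr ⟨uv', List.mem_cons_of_mem _ huv', hc⟩
      · rintro (hz | ⟨uv', huv', hc⟩)
        · exact Or.inl (Or.inl hz)
        · rcases List.mem_cons.mp huv' with rfl | huv''
          · exact Or.inl (Or.inr hc)
          · exact Or.inr ⟨uv', huv'', hc⟩

lemma buildAdj_char (n : Int) (roads : List (Int × Int)) :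
    (buildAdj n roads).length = (n + 1).toNat ∧
    (∀ k, k < (n + 1).toNat → ∀ z : Int,
      (z ∈ (buildAdj n roads).getD k [] ↔
        ∃ uv ∈ roads, (PySem.List.pyIdx? (n + 1).toNat uv.1 = some k ∧ uv.2 = z) ∨
          (PySem.List.pyIdx? (n + 1).toNat uv.2 = some k ∧ uv.1 = z))) := by
  have h0 : ((List.range (n + 1).toNat).map (fun _ => ([] : List Int))).length = (n + 1).toNat := by
    simp
  obtain ⟨hlen, hmem⟩ := buildAdj_aux (n + 1).toNat roads _ h0
  refine ⟨hlen, ?_⟩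
  intro k hk z
  unfold buildAdj
  rw [hmem k hk z]
  have hbase : ((List.range (n + 1).toNat).map (fun _ => ([] : List Int))).getD k [] = [] := by
    simp only [List.getD]
    cases h : ((List.range (n + 1).toNat).map (fun _ => ([] : List Int)))[k]? with
    | none => rfl
    | some l =>
        have hm := List.mem_of_getElem? h
        simp only [List.mem_map] at hm
        obtain ⟨-, -, rfl⟩ := hm
        rfl
  rw [hbase]
  simp

lemma intsFrom_succ (L : Int) (m : Nat) : intsFrom L (m + 1) = L :: intsFrom (L + 1) m := by
  unfold intsFrom
  rw [List.range_succ_eq_map, List.map_cons, List.map_map]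
  refine List.cons_eq_cons.mpr ⟨by simp, ?_⟩
  refine List.map_congr_left ?_
  intro j _
  simp only [Function.comp_apply, Int.ofNat_eq_natCast, Nat.succ_eq_add_one]
  push_cast
  ring

lemma condEquiv (roads : List (Int × Int)) (N : Nat) (adj : List (List Int))
    (hal : adj.length = N)
    (hamem : ∀ k, k < N → ∀ z : Int,
      (z ∈ adj.getD k [] ↔
        ∃ uv ∈ roads, (PySem.List.pyIdx? N uv.1 = some k ∧ uv.2 = z) ∨
          (PySem.List.pyIdx? N uv.2 = some k ∧ uv.1 = z)))
    (hEnds : ∀ uv ∈ roads, (∃ k, PySem.List.pyIdx? N uv.1 = some k) ∧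
      (∃ k, PySem.List.pyIdx? N uv.2 = some k))
    (d : List Int) (hd : d.length = N) (L : Int) (f : List Int)
    (hfc : ∀ x ∈ f, ∃ k, PySem.List.pyIdx? N x = some k)
    (hf : ∀ k, k < N → (at' d k = L ↔ ∃ x ∈ f, PySem.List.pyIdx? N x = some k)) :
    ∀ k, k < N → (PA adj N f k ↔ PB roads N d L k) := by
  intro k hk
  constructor
  · rintro ⟨x, hx, v, hv, hvk⟩
    obtain ⟨kx, hkx⟩ := hfc x hx
    have hkxlt : kx < N := idx_lt hkx
    have hga : PySem.List.pyGetD adj x ([] : List Int) = adj.getD kx [] :=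
      getD_eq_getD (by rw [hal]; exact hkx) _
    rw [hga] at hv
    have hdkx : at' d kx = L := (hf kx hkxlt).mpr ⟨x, hx, hkx⟩
    obtain ⟨uv, huv, hcase⟩ := (hamem kx hkxlt v).mp hv
    rcases hcase with ⟨h1, rfl⟩ | ⟨h1, rfl⟩
    · refine ⟨uv, huv, Or.inl ⟨?_, hvk⟩⟩
      rw [getD_idx' (by rw [hd]; exact h1) 0]
      exact hdkx
    · refine ⟨uv, huv, Or.inr ⟨?_, hvk⟩⟩
      rw [getD_idx' (by rw [hd]; exact h1) 0]
      exact hdkx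
  · rintro ⟨uv, huv, ⟨h1, h2⟩ | ⟨h1, h2⟩⟩
    · obtain ⟨ku, hku⟩ := (hEnds uv huv).1
      rw [getD_idx' (by rw [hd]; exact hku) 0] at h1
      obtain ⟨x, hx, hxk⟩ := (hf ku (idx_lt hku)).mp h1
      refine ⟨x, hx, uv.2, ?_, h2⟩
      rw [getD_eq_getD (by rw [hal]; exact hxk) ([] : List Int)]
      exact (hamem ku (idx_lt hku) uv.2).mpr ⟨uv, huv, Or.inl ⟨hku, rfl⟩⟩
    · obtain ⟨kv, hkv⟩ := (hEnds uv huv).2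
      rw [getD_idx' (by rw [hd]; exact hkv) 0] at h1
      obtain ⟨x, hx, hxk⟩ := (hf kv (idx_lt hkv)).mp h1
      refine ⟨x, hx, uv.1, ?_, h2⟩
      rw [getD_eq_getD (by rw [hal]; exact hxk) ([] : List Int)]
      exact (hamem kv (idx_lt hkv) uv.1).mpr ⟨uv, huv, Or.inr ⟨hkv, rfl⟩⟩

lemma roundsEq (roads : List (Int × Int)) (N : Nat) (adj : List (List Int))
    (hal : adj.length = N)
    (hamem : ∀ k, k < N → ∀ z : Int,
      (z ∈ adj.getD k [] ↔
        ∃ uv ∈ roads, (PySem.List.pyIdx? N uv.1 = some k ∧ uv.2 = z) ∨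
          (PySem.List.pyIdx? N uv.2 = some k ∧ uv.1 = z)))
    (hEnds : ∀ uv ∈ roads, (∃ k, PySem.List.pyIdx? N uv.1 = some k) ∧
      (∃ k, PySem.List.pyIdx? N uv.2 = some k)) :
    ∀ (m fa : Nat) (d f : List Int) (L : Int),
      d.length = N → 0 ≤ L →
      (∀ x ∈ f, ∃ k, PySem.List.pyIdx? N x = some k) →
      (∀ k, k < N → (at' d k = L ↔ ∃ x ∈ f, PySem.List.pyIdx? N x = some k)) →
      (∀ k, k < N → (at' d k = -1 ∨ (0 ≤ at' d k ∧ at' d k ≤ L))) →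
      countNeg d ≤ m → countNeg d + 2 ≤ fa →
      loopB adj fa L d f = loopsB roads (intsFrom L m) d := by
  intro m
  induction m with
  | zero =>
      intro fa d f L hd hL hfc hf hvals hcm hfa
      have hcz : countNeg d = 0 := Nat.le_zero.mp hcm
      have hno : ∀ k, k < N → at' d k ≠ -1 := by
        intro k hk
        exact countNeg_zero hcz (by rw [hd]; exact hk)
      have hrhs : loopsB roads (intsFrom L 0) d = d := by
        unfold intsFrom
        simp [loopsB]
      rw [hrhs]
      cases fa with
      | zero => omega
      | succ fa' =>
          cases f with
          | nil => rfl
          | cons x rest =>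
              obtain ⟨D, E, hfold, hlen, hcnt, hpt, hEch, hEc⟩ := charRound adj hL (x :: rest) d
              rw [hd] at hlen hpt hEch hEc
              have hE : E = [] := by
                rcases E with - | ⟨v, E'⟩
                · rfl
                · obtain ⟨k, hk⟩ := hEc v List.mem_cons_self
                  have := (hEch k (idx_lt hk)).mp ⟨v, List.mem_cons_self, hk⟩
                  exact absurd this.1 (hno k (idx_lt hk))
              have hD : D = d := by
                refine ext_at' (by rw [hlen, hd]) ?_
                intro k hk
                rw [hlen] at hk
                exact (hpt k hk).2 (fun h => hno k hk h.1)
              have h1 : loopB adj (fa' + 1) L d (x :: rest) = loopB adj fa' (L + 1) D E := by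
                simp only [loopB]
                rw [hfold []]
                simp
              rw [h1, hE, hD]
              cases fa' with
              | zero => omega
              | succ fa'' => rfl
  | succ m IH =>
      intro fa d f L hd hL hfc hf hvals hcm hfa
      rw [intsFrom_succ]
      have hEnds' : ∀ uv ∈ roads, (∃ k, PySem.List.pyIdx? d.length uv.1 = some k) ∧
          (∃ k, PySem.List.pyIdx? d.length uv.2 = some k) := by
        rw [hd]; exact hEnds
      obtain ⟨D', ch, hfoldB, hlenB, hptB, hchB⟩ := charB hL roads d false hEnds'
      rw [hd] at hlenB hptB hchB
      have hunf : loopsB roads (L :: intsFrom (L + 1) m) d =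
          if ch then loopsB roads (intsFrom (L + 1) m) D' else D' := by
        show (let s := roads.foldl (relax L) (d, false);
          if s.2 then loopsB roads (intsFrom (L + 1) m) s.1 else s.1) = _
        rw [hfoldB]
      rw [hunf]
      cases fa with
      | zero => omega
      | succ fa' =>
          cases f with
          | nil =>
              have hnoPB : ∀ k, k < N → ¬PB roads N d L k := by
                rintro k hk ⟨uv, huv, ⟨h1, -⟩ | ⟨h1, -⟩⟩
                · obtain ⟨ku, hku⟩ := (hEnds uv huv).1
                  rw [getD_idx' (by rw [hd]; exact hku) 0] at h1
                  obtain ⟨x, hx, -⟩ := (hf ku (idx_lt hku)).mp h1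
                  simp at hx
                · obtain ⟨kv, hkv⟩ := (hEnds uv huv).2
                  rw [getD_idx' (by rw [hd]; exact hkv) 0] at h1
                  obtain ⟨x, hx, -⟩ := (hf kv (idx_lt hkv)).mp h1
                  simp at hx
              have hD' : D' = d := by
                refine ext_at' (by rw [hlenB, hd]) ?_
                intro k hk
                rw [hlenB] at hk
                exact (hptB k hk).2 (fun h => hnoPB k hk h.2)
              have hch : ch = false := by
                cases hcc : ch with
                | false => rfl
                | true =>
                    rcases hchB.mp hcc with h | ⟨k, hk, -, hPB⟩
                    · simp at h
                    · exact absurd hPB (hnoPB k hk)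
              rw [hch, hD']
              simp only [Bool.false_eq_true, if_false]
              rfl
          | cons x rest =>
              obtain ⟨D, E, hfoldA, hlenA, hcntA, hptA, hEchA, hEcA⟩ := charRound adj hL (x :: rest) d
              rw [hd] at hlenA hptA hEchA hEcA
              have hcond := condEquiv roads N adj hal hamem hEnds d hd L (x :: rest) hfc hf
              have hDD' : D = D' := by
                refine ext_at' (by rw [hlenA, hlenB]) ?_
                intro k hk
                rw [hlenA] at hk
                by_cases hc : at' d k = -1 ∧ PA adj N (x :: rest) k
                · rw [(hptA k hk).1 hc, (hptB k hk).1 ⟨hc.1, (hcond k hk).mp hc.2⟩]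
                · rw [(hptA k hk).2 hc, (hptB k hk).2 (fun h => hc ⟨h.1, (hcond k hk).mpr h.2⟩)]
              have hstepA : loopB adj (fa' + 1) L d (x :: rest) = loopB adj fa' (L + 1) D E := by
                simp only [loopB]
                rw [hfoldA []]
                simp
              rw [hstepA]
              rcases E with - | ⟨v0, E'⟩
              · -- no discovery: both sides stop with d
                have hnoc : ∀ k, k < N → ¬(at' d k = -1 ∧ PA adj N (x :: rest) k) := by
                  intro k hk hc
                  obtain ⟨v, hv, -⟩ := (hEchA k hk).mpr hc
                  simp at hv
                have hD : D = d := by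
                  refine ext_at' (by rw [hlenA, hd]) ?_
                  intro k hk
                  rw [hlenA] at hk
                  exact (hptA k hk).2 (hnoc k hk)
                have hch : ch = false := by
                  cases hcc : ch with
                  | false => rfl
                  | true =>
                      rcases hchB.mp hcc with h | ⟨k, hk, hneg, hPB⟩
                      · simp at h
                      · exact absurd ⟨hneg, (hcond k hk).mpr hPB⟩ (hnoc k hk)
                rw [hch, hD, ← hDD', hD]
                simp only [Bool.false_eq_true, if_false]
                cases fa' with
                | zero => omega
                | succ fa'' => rfl
              · -- discovery: one more level on both sides
                have hvE : ∀ v ∈ v0 :: E', ∃ k, PySem.List.pyIdx? N v = some k := hEcA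
                obtain ⟨k0, hk0⟩ := hvE v0 List.mem_cons_self
                have hk0lt : k0 < N := idx_lt hk0
                have hc0 := (hEchA k0 hk0lt).mp ⟨v0, List.mem_cons_self, hk0⟩
                have hch : ch = true :=
                  hchB.mpr (Or.inr ⟨k0, hk0lt, hc0.1, (hcond k0 hk0lt).mp hc0.2⟩)
                rw [hch, if_pos rfl]
                have hrec := IH fa' D (v0 :: E') (L + 1) hlenA (by omega) hEcA ?_ ?_ ?_ ?_
                · rw [hrec, hDD']
                · -- hf at level L+1
                  intro k hk
                  constructor
                  · intro hDk
                    by_cases hc : at' d k = -1 ∧ PA adj N (x :: rest) k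
                    · exact (hEchA k hk).mpr hc
                    · rw [(hptA k hk).2 hc] at hDk
                      rcases hvals k hk with h | h
                      · omega
                      · omega
                  · intro hE
                    obtain ⟨hneg, hPA⟩ := (hEchA k hk).mp hE
                    exact (hptA k hk).1 ⟨hneg, hPA⟩
                · -- value bounds at level L+1
                  intro k hk
                  by_cases hc : at' d k = -1 ∧ PA adj N (x :: rest) k
                  · rw [(hptA k hk).1 hc]
                    right; omega
                  · rw [(hptA k hk).2 hc]
                    rcases hvals k hk with h | h
                    · left; exact h
                    · right; omega
                · -- count bound
                  have : (v0 :: E').length = E'.length + 1 := rfl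
                  omega
                · -- fuel bound
                  have : (v0 :: E').length = E'.length + 1 := rfl
                  omega

-- ===== VERDICT (by name: the statement is the Claim_ definition above) =====
theorem solution_spec : Claim_equal_solution := by
  intro n roads sources destination _ hpre
  obtain ⟨hdest, hroads, -⟩ := hpre
  unfold Spec_solution solution solution_alt
  dsimp only
  have hEnds : ∀ uv ∈ roads, (∃ k, PySem.List.pyIdx? (n + 1).toNat uv.1 = some k) ∧
      (∃ k, PySem.List.pyIdx? (n + 1).toNat uv.2 = some k) := fun uv h =>
    ⟨idx_of_inRange (hroads uv h).1, idx_of_inRange (hroads uv h).2⟩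
  obtain ⟨hal, hamem⟩ := buildAdj_char n roads
  obtain ⟨k, hk⟩ : ∃ k, PySem.List.pyIdx? (n + 1).toNat destination = some k :=
    idx_of_inRange hdest
  have hklt : k < (n + 1).toNat := idx_lt hk
  have hrl : (List.replicate (n + 1).toNat (-1 : Int)).length = (n + 1).toNat :=
    List.length_replicate
  have hk' : PySem.List.pyIdx? (List.replicate (n + 1).toNat (-1 : Int)).length destination
      = some k := by rw [hrl]; exact hk
  have hset : PySem.List.pySetD (List.replicate (n + 1).toNat (-1 : Int)) destination 0
      = (List.replicate (n + 1).toNat (-1 : Int)).set k 0 := setD_idx hk' 0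
  rw [hset]
  have hlen0 : ((List.replicate (n + 1).toNat (-1 : Int)).set k 0).length = (n + 1).toNat := by
    rw [List.length_set, hrl]
  have hcnt0 : countNeg ((List.replicate (n + 1).toNat (-1 : Int)).set k 0) + 1
      = (n + 1).toNat := by
    have hflip := countNeg_set_flip (d := List.replicate (n + 1).toNat (-1 : Int))
      (by rw [hrl]; exact hklt) (by simp) (w := 0) (by norm_num)
    have hcr : countNeg (List.replicate (n + 1).toNat (-1 : Int)) = (n + 1).toNat := by
      simp [countNeg, List.countP_replicate]
    omega
  have hdd : PySem.List.pyGetD ((List.replicate (n + 1).toNat (-1 : Int)).set k 0)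
      destination 0 = 0 := by
    rw [getD_set _ k 0 destination 0 (by rw [hrl]; exact hklt), if_pos hk']
  -- step 1: A's queue BFS = the level-synchronous machine
  have hsim := bfs_sim (buildAdj n roads) (n + 1).toNat
    (2 * countNeg ((List.replicate (n + 1).toNat (-1 : Int)).set k 0) + 1)
    ((List.replicate (n + 1).toNat (-1 : Int)).set k 0) [destination] [] 0
    (2 * (n + 1).toNat + 2) ((n + 1).toNat + 1)
    (by simp) hlen0 (le_refl 0)
    (by intro x hx; rw [List.mem_singleton] at hx; subst hx; exact hdd)
    (by intro x hx; simp at hx)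
    (by simp only [List.length_cons, List.length_nil]; omega)
    (by simp only [List.length_nil]; omega)
  simp only [List.append_nil] at hsim
  have hB : loopB (buildAdj n roads) ((n + 1).toNat + 2) 0
      ((List.replicate (n + 1).toNat (-1 : Int)).set k 0) [destination]
      = loopB (buildAdj n roads) ((n + 1).toNat + 1) (0 + 1)
        (([destination].foldl (visitB (buildAdj n roads) 0)
          (((List.replicate (n + 1).toNat (-1 : Int)).set k 0), ([] : List Int)))).1
        (([destination].foldl (visitB (buildAdj n roads) 0)
          (((List.replicate (n + 1).toNat (-1 : Int)).set k 0), ([] : List Int)))).2 := by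
    simp [loopB]
  have hAB : loopA (buildAdj n roads) (2 * (n + 1).toNat + 2)
      ((List.replicate (n + 1).toNat (-1 : Int)).set k 0) [destination]
      = loopB (buildAdj n roads) ((n + 1).toNat + 2) 0
        ((List.replicate (n + 1).toNat (-1 : Int)).set k 0) [destination] := by
    rw [hB, ← hsim]
  rw [hAB]
  -- base dist facts
  have hbase : ∀ k', k' < (n + 1).toNat →
      at' ((List.replicate (n + 1).toNat (-1 : Int)).set k 0) k' =
        if k' = k then 0 else -1 := by
    intro k' hk'lt
    rw [at'_set (by rw [hrl]; exact hklt) 0 k']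
    by_cases hkk : k' = k
    · simp [hkk]
    · rw [if_neg hkk, if_neg hkk]
      simp [at', List.getD, hk'lt]
  -- step 2: the level machine = B's edge-relaxation rounds
  have hrounds := roundsEq roads (n + 1).toNat (buildAdj n roads) hal hamem hEnds
    n.toNat ((n + 1).toNat + 2)
    ((List.replicate (n + 1).toNat (-1 : Int)).set k 0) [destination] 0
    hlen0 (le_refl 0)
    (by intro x hx; rw [List.mem_singleton] at hx; subst hx; exact ⟨k, hk⟩)
    (by
      intro k' hk'lt
      rw [hbase k' hk'lt]
      by_cases hkk : k' = k
      · subst hkk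
        rw [if_pos rfl]
        constructor
        · intro _; exact ⟨destination, List.mem_singleton.mpr rfl, hk⟩
        · intro _; rfl
      · rw [if_neg hkk]
        constructor
        · intro h; norm_num at h
        · rintro ⟨x, hx, hxk⟩
          rw [List.mem_singleton] at hx
          subst hx
          rw [hk] at hxk
          exact absurd (Option.some.inj hxk).symm hkk)
    (by
      intro k' hk'lt
      rw [hbase k' hk'lt]
      by_cases hkk : k' = k
      · rw [if_pos hkk]; right; omega
      · rw [if_neg hkk]; left; rfl)
    (by omega)
    (by omega)
  rw [hrounds]
  have hpr : PySem.List.pyRange 0 n 1 = intsFrom 0 n.toNat := by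
    rw [PySem.List.pyRange_one]
    unfold intsFrom
    norm_num
  rw [hpr]
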